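-- pv_equiv track=rewrite | github.com/hansxiao7/leetcode-python | 1786--Number of Restricted Paths From First to Last Node/solution1-dijkstra.py | dfs
-- ===== SOURCE A (Python) =====
-- def dfs(x, n, graph, dis_to_last):
--     if x == n:
--         return 1
--
--     # find child
--     result = 0
--     children = graph.get(x, [])
--     for i in range(len(children)):
--         child, cost = children[i]
--         if dis_to_last[x] > dis_to_last[child]:
--             result += dfs(child, n, graph, dis_to_last)
--
--     return result
-- ===== SOURCE B (Python) =====
-- def dfs(x, n, graph, dis_to_last):
--     # two phases instead of A's exponential recursion:
--     # 1) one DFS collects the reachable nodes in post-order (children before parents)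
--     # 2) bottom-up DP: fill a count table along that topological order, each node once
--     if x == n:
--         return 1
--     order = _collect(x, n, graph, dis_to_last, [])
--     count = {}
--     for v in order:
--         if v == n:
--             count[v] = 1
--         else:
--             total = 0
--             for c, _cost in graph.get(v, []):
--                 if dis_to_last[c] < dis_to_last[v]:
--                     total += count[c]
--             count[v] = total
--     return count[x]
--
-- def _collect(v, n, graph, dis_to_last, order):
--     if v in order:
--         return order
--     if v != n:
--         for c, _cost in graph.get(v, []):
--             if dis_to_last[c] < dis_to_last[v]:
--                 order = _collect(c, n, graph, dis_to_last, order)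
--     return order + [v]
-- ===== Notes on version B (the rewrite author's own statement) =====
-- stated objective: alternative
-- what changed: Replaces A's exponential top-down recursion by two linear passes: one post-order DFS lists the reachable nodes children-first, then a single table-filling loop computes each node's restricted-path count exactly once along that topological order.
import Mathlib
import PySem

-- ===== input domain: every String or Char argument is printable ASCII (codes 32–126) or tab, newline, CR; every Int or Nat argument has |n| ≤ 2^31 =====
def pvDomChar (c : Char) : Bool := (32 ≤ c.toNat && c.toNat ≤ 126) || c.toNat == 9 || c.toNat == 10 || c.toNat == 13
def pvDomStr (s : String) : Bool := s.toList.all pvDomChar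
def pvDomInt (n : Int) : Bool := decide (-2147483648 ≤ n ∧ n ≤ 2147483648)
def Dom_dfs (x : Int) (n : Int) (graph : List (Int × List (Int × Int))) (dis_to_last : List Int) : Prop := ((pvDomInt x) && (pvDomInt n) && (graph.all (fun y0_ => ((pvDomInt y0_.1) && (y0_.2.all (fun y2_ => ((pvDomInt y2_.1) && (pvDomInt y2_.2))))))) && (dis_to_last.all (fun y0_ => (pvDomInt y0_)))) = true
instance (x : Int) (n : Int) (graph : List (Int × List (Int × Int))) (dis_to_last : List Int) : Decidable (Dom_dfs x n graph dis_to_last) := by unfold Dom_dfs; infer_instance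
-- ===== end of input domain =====

-- B replaces A's exponential recursion by one post-order DFS that lists the reachable nodes
-- children-first, followed by a single table-filling pass (alternative algorithm; same return value).

-- Termination measure shared by the recursive ports: number of dis_to_last entries strictly
-- below the node's own distance (the traversal only descends to strictly smaller distances).
def pvMu (dis : List Int) (v : Int) : Nat :=
  match PySem.List.pyGet? dis v with
  | some d => (dis.filter (fun w => decide (w < d))).length
  | none => 0

theorem pvFilterLt_mono (l : List Int) (dc dx : Int) (h : dc ≤ dx) :
    (l.filter (fun w => decide (w < dc))).length ≤ (l.filter (fun w => decide (w < dx))).length := by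
  induction l with
  | nil => simp
  | cons a tl ih =>
    by_cases h1 : a < dc
    · have h2 : a < dx := lt_of_lt_of_le h1 h
      simp [List.filter, h1, h2]; omega
    · by_cases h2 : a < dx <;> simp [List.filter, h1, h2] <;> omega

theorem pvFilterLt_strict (l : List Int) (dc dx : Int) (hm : dc ∈ l) (h : dc < dx) :
    (l.filter (fun w => decide (w < dc))).length < (l.filter (fun w => decide (w < dx))).length := by
  induction l with
  | nil => simp at hm
  | cons a tl ih =>
    rcases List.mem_cons.mp hm with rfl | hm'
    · have h1 : ¬ (dc < dc) := lt_irrefl dc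
      have := pvFilterLt_mono tl dc dx (le_of_lt h)
      simp [List.filter, h]; omega
    · have := ih hm'
      by_cases h1 : a < dc
      · have h2 : a < dx := lt_of_lt_of_le h1 (le_of_lt h)
        simp [List.filter, h1, h2]; omega
      · by_cases h2 : a < dx <;> simp [List.filter, h1, h2] <;> omega

theorem pvMu_lt (dis : List Int) (x c dx dc : Int)
    (h1 : PySem.List.pyGet? dis x = some dx) (h2 : PySem.List.pyGet? dis c = some dc)
    (h : dc < dx) : pvMu dis c < pvMu dis x := by
  have hmem : dc ∈ dis := PySem.List.mem_of_pyGet?_eq_some _ h2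
  unfold pvMu
  rw [h1, h2]
  exact pvFilterLt_strict dis dc dx hmem h

-- ===== PORT A =====
mutual
-- A: if x == n return 1; else sum dfs(child) over children with dis[x] > dis[child].
def dfs (x : Int) (n : Int) (graph : List (Int × List (Int × Int))) (dis_to_last : List Int) : Int :=
  if x = n then 1
  else dfsChildren ((PySem.Dict.mk graph).getD x []) x n graph dis_to_last
termination_by (pvMu dis_to_last x, 1, 0)
decreasing_by exact Prod.Lex.right _ (Prod.Lex.left _ _ (by omega))
-- the 'for i in range(len(children))' loop of A, as structural recursion over children
def dfsChildren (children : List (Int × Int)) (x : Int) (n : Int) (graph : List (Int × List (Int × Int))) (dis_to_last : List Int) : Int :=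
  match children with
  | [] => 0
  | (child, _cost) :: rest =>
    (match h1 : PySem.List.pyGet? dis_to_last x, h2 : PySem.List.pyGet? dis_to_last child with
     | some dx, some dc =>
       if h : dc < dx then dfs child n graph dis_to_last else 0
     | _, _ => 0)  -- none = IndexError in Python: excluded by Pre_dfs
    + dfsChildren rest x n graph dis_to_last
termination_by (pvMu dis_to_last x, 0, children.length)
decreasing_by
  all_goals first
    | exact Prod.Lex.left _ _ (pvMu_lt _ _ _ _ _ h1 h2 h)
    | exact Prod.Lex.right _ (Prod.Lex.right _ (by simp [List.length_cons]))
end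

-- ===== PORT B =====
mutual
-- Source B's _collect: post-order DFS appending each node after its strict children
def pvCollect (v : Int) (n : Int) (graph : List (Int × List (Int × Int))) (dis_to_last : List Int) (order : List Int) : List Int :=
  if order.contains v then order
  else
    (if v = n then order
     else pvCollectChildren ((PySem.Dict.mk graph).getD v []) v n graph dis_to_last order) ++ [v]
termination_by (pvMu dis_to_last v, 1, 0)
decreasing_by exact Prod.Lex.right _ (Prod.Lex.left _ _ (by omega))
-- _collect's 'for c, _cost in graph.get(v, [])' loop
def pvCollectChildren (children : List (Int × Int)) (v : Int) (n : Int) (graph : List (Int × List (Int × Int))) (dis_to_last : List Int) (order : List Int) : List Int :=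
  match children with
  | [] => order
  | (c, _cost) :: rest =>
    pvCollectChildren rest v n graph dis_to_last
      (match h1 : PySem.List.pyGet? dis_to_last c, h2 : PySem.List.pyGet? dis_to_last v with
       | some dc, some dv =>
         if h : dc < dv then pvCollect c n graph dis_to_last order else order
       | _, _ => order)  -- none = IndexError in Python: excluded by Pre_dfs
termination_by (pvMu dis_to_last v, 0, children.length)
decreasing_by
  all_goals first
    | exact Prod.Lex.left _ _ (pvMu_lt _ _ _ _ _ h2 h1 h)
    | exact Prod.Lex.right _ (Prod.Lex.right _ (by simp [List.length_cons]))
end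

-- the lookups dis_to_last[v] of Source B's table pass; the default is never used inside
-- Pre_dfs (every index the pass touches is in range there), where pyGetD is exact
def pvKey (dis_to_last : List Int) (v : Int) : Int := PySem.List.pyGetD dis_to_last v 0

-- the body of Source B's 'for v in order' table-filling loop (count[c] is present whenever
-- read inside Pre_dfs, so getD's default is never used there)
def pvStep (n : Int) (graph : List (Int × List (Int × Int))) (dis_to_last : List Int)
    (cnt : PySem.Dict Int Int) (v : Int) : PySem.Dict Int Int :=
  if v = n then cnt.insert v 1
  else cnt.insert v (((PySem.Dict.mk graph).getD v []).foldl
      (fun total e => if pvKey dis_to_last e.1 < pvKey dis_to_last v then total + cnt.getD e.1 0 else total) 0)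

def dfs_alt (x : Int) (n : Int) (graph : List (Int × List (Int × Int))) (dis_to_last : List Int) : Int :=
  if x = n then 1
  else
    ((pvCollect x n graph dis_to_last []).foldl (pvStep n graph dis_to_last) PySem.Dict.empty).getD x 0

-- ===== PRECONDITION & SPEC =====
-- every node the graph or the call mentions (keys, edge targets, x)
def pvNodes (graph : List (Int × List (Int × Int))) (x : Int) : List Int :=
  graph.map (·.1) ++ (graph.map (·.2)).flatMap (fun l => l.map (·.1)) ++ [x]

-- there is a restricted edge u -> c (c is a child of u and dis[c] < dis[u], both in range)
def pvEdgeB (graph : List (Int × List (Int × Int))) (dis : List Int) (u c : Int) : Bool :=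
  ((PySem.Dict.mk graph).getD u []).any (fun e =>
    e.1 == c &&
    (match PySem.List.pyGet? dis e.1, PySem.List.pyGet? dis u with
     | some dc, some du => decide (dc < du)
     | _, _ => false))

-- one inner round: append the restricted-edge targets of node u not collected yet
def pvAddTargets (graph : List (Int × List (Int × Int))) (dis : List Int) (u : Int)
    (l : List (Int × Int)) (acc : List Int) : List Int :=
  l.foldl (fun acc2 e =>
    if pvEdgeB graph dis u e.1 && !acc2.contains e.1 then acc2 ++ [e.1] else acc2) acc

-- one expansion round: add every restricted-edge target of an already-reached key other than n
def pvExpand (n : Int) (graph : List (Int × List (Int × Int))) (dis : List Int)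
    (S : List Int) : List Int :=
  graph.foldl (fun acc p =>
    if S.contains p.1 && decide (p.1 ≠ n) then pvAddTargets graph dis p.1 p.2 acc else acc) S

-- the nodes reachable from x in at most k restricted-edge steps, never stepping out of n
def pvReachList (x n : Int) (graph : List (Int × List (Int × Int))) (dis : List Int) : Nat → List Int
  | 0 => [x]
  | k+1 => pvExpand n graph dis (pvReachList x n graph dis k)

def pvReachB (x n : Int) (graph : List (Int × List (Int × Int))) (dis : List Int)
    (k : Nat) (v : Int) : Bool :=
  decide (v ∈ pvReachList x n graph dis k)

-- Pre_dfs holds exactly when A returns: it fails only when some node reachable from x along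
-- restricted edges has, together with a nonempty child list, itself or a child out of range
-- of dis_to_last — there Python A (and Python B) raise IndexError.
def Pre_dfs (x : Int) (n : Int) (graph : List (Int × List (Int × Int))) (dis_to_last : List Int) : Prop :=
  x = n ∨
  ∀ v ∈ pvNodes graph x, pvReachB x n graph dis_to_last (dis_to_last.length + 1) v = true →
    v ≠ n → (PySem.Dict.mk graph).getD v [] ≠ [] →
      PySem.Raise.InRange dis_to_last.length v ∧
      ∀ e ∈ (PySem.Dict.mk graph).getD v [], PySem.Raise.InRange dis_to_last.length e.1
instance (x : Int) (n : Int) (graph : List (Int × List (Int × Int))) (dis_to_last : List Int) : Decidable (Pre_dfs x n graph dis_to_last) := by unfold Pre_dfs; infer_instance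

def pvWitness_dfs : Int × Int × (List (Int × List (Int × Int))) × List Int :=
  (0, 2, [(0, [(1, 5)]), (1, [(2, 3)])], [7, 3, 0])

def Spec_dfs (x : Int) (n : Int) (graph : List (Int × List (Int × Int))) (dis_to_last : List Int) (out : Int) : Prop := out = dfs_alt x n graph dis_to_last
instance (x : Int) (n : Int) (graph : List (Int × List (Int × Int))) (dis_to_last : List Int) (out : Int) : Decidable (Spec_dfs x n graph dis_to_last out) := by unfold Spec_dfs; infer_instance

-- ===== CLAIM (what is proved, stated in full; the proofs are below) =====
def Claim_equal_dfs : Prop := ∀ (x : Int) (n : Int) (graph : List (Int × List (Int × Int))) (dis_to_last : List Int), Dom_dfs x n graph dis_to_last → Pre_dfs x n graph dis_to_last → Spec_dfs x n graph dis_to_last (dfs x n graph dis_to_last)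

-- ===== LEMMAS AND PROOFS =====

theorem pvMu_le (dis : List Int) (v : Int) : pvMu dis v ≤ dis.length := by
  unfold pvMu
  split
  · exact le_trans (List.length_filter_le _ _) (le_refl _)
  · omega

-- any child list served by the dict comes from some entry of graph
theorem pv_mem_getD_mk (g : List (Int × List (Int × Int))) (v : Int) (e : Int × Int)
    (he : e ∈ (PySem.Dict.mk g).getD v []) : ∃ p ∈ g, e ∈ p.2 := by
  induction g with
  | nil =>
    rw [show (PySem.Dict.mk ([] : List (Int × List (Int × Int)))) = PySem.Dict.empty from rfl] at he
    simp [PySem.Dict.getD_eq_get?_getD, PySem.Dict.get?_empty] at he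
  | cons hd tl ih =>
    obtain ⟨k, l⟩ := hd
    rw [PySem.Dict.getD_eq_get?_getD, PySem.Dict.get?_mk_cons] at he
    by_cases hk : k == v
    · rw [if_pos hk] at he
      exact ⟨(k, l), List.mem_cons_self, he⟩
    · rw [if_neg hk] at he
      rw [← PySem.Dict.getD_eq_get?_getD] at he
      obtain ⟨p, hp, hep⟩ := ih he
      exact ⟨p, List.mem_cons_of_mem _ hp, hep⟩

theorem pv_child_mem_nodes (g : List (Int × List (Int × Int))) (x v : Int) (e : Int × Int)
    (he : e ∈ (PySem.Dict.mk g).getD v []) : e.1 ∈ pvNodes g x := by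
  obtain ⟨p, hp, hep⟩ := pv_mem_getD_mk g v e he
  simp only [pvNodes, List.mem_append, List.mem_flatMap, List.mem_map]
  exact Or.inl (Or.inr ⟨p.2, ⟨p, hp, rfl⟩, e, hep, rfl⟩)

theorem pv_x_mem_nodes (g : List (Int × List (Int × Int))) (x : Int) : x ∈ pvNodes g x := by
  simp [pvNodes]

theorem pv_pyGetD_of_pyGet? (dis : List Int) (i a : Int)
    (h : PySem.List.pyGet? dis i = some a) : PySem.List.pyGetD dis i 0 = a := by
  simp [PySem.List.pyGetD, h]

theorem pv_pyGet?_of_inRange (dis : List Int) (i : Int) (h : PySem.Raise.InRange dis.length i) :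
    PySem.List.pyGet? dis i = some (pvKey dis i) := by
  cases hg : PySem.List.pyGet? dis i with
  | none => exact absurd ((PySem.List.pyGet?_eq_none_iff dis i).mp hg) (not_not_intro h)
  | some a => rw [pvKey, pv_pyGetD_of_pyGet? dis i a hg]

-- a nonempty served child list pins its key-entry in graph
theorem pv_entry_of_getD (g : List (Int × List (Int × Int))) (u : Int)
    (h : (PySem.Dict.mk g).getD u [] ≠ []) :
    (u, (PySem.Dict.mk g).getD u []) ∈ g := by
  rw [PySem.Dict.getD_eq_get?_getD] at h ⊢
  cases hg : (PySem.Dict.mk g).get? u with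
  | none => rw [hg] at h; simp at h
  | some l =>
    simp only [Option.getD_some]
    have := PySem.Dict.mem_items_of_get?_eq_some (PySem.Dict.mk g) hg
    simpa [PySem.Dict.items] using this

-- ----- facts about the bounded reachability predicate -----
theorem pv_mem_addTargets (graph : List (Int × List (Int × Int))) (dis : List Int) (u : Int) :
    ∀ (l : List (Int × Int)) (acc : List Int) (c : Int),
      c ∈ pvAddTargets graph dis u l acc ↔
        c ∈ acc ∨ ∃ e ∈ l, pvEdgeB graph dis u e.1 = true ∧ e.1 = c := by
  intro l
  induction l with
  | nil => intro acc c; simp [pvAddTargets]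
  | cons e0 tl ih =>
    intro acc c
    have hrw : pvAddTargets graph dis u (e0 :: tl) acc
        = pvAddTargets graph dis u tl
            (if pvEdgeB graph dis u e0.1 && !acc.contains e0.1 then acc ++ [e0.1] else acc) := rfl
    rw [hrw, ih]
    by_cases hg : pvEdgeB graph dis u e0.1 = true
    · by_cases hc : acc.contains e0.1
      · have hm : e0.1 ∈ acc := by simpa using hc
        simp only [hg, hc, Bool.true_and, Bool.not_true, if_false]
        constructor
        · rintro (h | ⟨e, he, hge, rfl⟩)
          · exact Or.inl h
          · exact Or.inr ⟨e, List.mem_cons_of_mem _ he, hge, rfl⟩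
        · rintro (h | ⟨e, he, hge, rfl⟩)
          · exact Or.inl h
          · rcases List.mem_cons.mp he with rfl | he'
            · exact Or.inl hm
            · exact Or.inr ⟨e, he', hge, rfl⟩
      · simp only [hg, hc, Bool.true_and, Bool.not_false, if_true, List.mem_append,
          List.mem_singleton]
        constructor
        · rintro ((h | rfl) | ⟨e, he, hge, rfl⟩)
          · exact Or.inl h
          · exact Or.inr ⟨e0, List.mem_cons_self, hg, rfl⟩
          · exact Or.inr ⟨e, List.mem_cons_of_mem _ he, hge, rfl⟩
        · rintro (h | ⟨e, he, hge, rfl⟩)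
          · exact Or.inl (Or.inl h)
          · rcases List.mem_cons.mp he with rfl | he'
            · exact Or.inl (Or.inr rfl)
            · exact Or.inr ⟨e, he', hge, rfl⟩
    · have hg' : pvEdgeB graph dis u e0.1 = false := by
        cases hb : pvEdgeB graph dis u e0.1
        · rfl
        · exact absurd hb hg
      simp only [hg', Bool.false_and, if_false]
      constructor
      · rintro (h | ⟨e, he, hge, rfl⟩)
        · exact Or.inl h
        · exact Or.inr ⟨e, List.mem_cons_of_mem _ he, hge, rfl⟩
      · rintro (h | ⟨e, he, hge, rfl⟩)
        · exact Or.inl h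
        · rcases List.mem_cons.mp he with rfl | he'
          · exact absurd hge hg
          · exact Or.inr ⟨e, he', hge, rfl⟩

theorem pv_mem_expand_aux (n : Int) (graph : List (Int × List (Int × Int))) (dis : List Int)
    (S : List Int) :
    ∀ (g' : List (Int × List (Int × Int))) (acc : List Int) (c : Int),
      c ∈ g'.foldl (fun acc p =>
          if S.contains p.1 && decide (p.1 ≠ n) then pvAddTargets graph dis p.1 p.2 acc else acc) acc ↔
        c ∈ acc ∨ ∃ p ∈ g', p.1 ∈ S ∧ p.1 ≠ n ∧
          ∃ e ∈ p.2, pvEdgeB graph dis p.1 e.1 = true ∧ e.1 = c := by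
  intro g'
  induction g' with
  | nil => intro acc c; simp
  | cons p0 tl ih =>
    intro acc c
    rw [List.foldl_cons]
    by_cases hS : p0.1 ∈ S
    · by_cases hn : p0.1 = (n : Int)
      · have : (S.contains p0.1 && decide (p0.1 ≠ n)) = false := by simp [hn]
        rw [this, if_neg (by simp), ih]
        constructor
        · rintro (h | ⟨p, hp, h1, h2, h3⟩)
          · exact Or.inl h
          · exact Or.inr ⟨p, List.mem_cons_of_mem _ hp, h1, h2, h3⟩
        · rintro (h | ⟨p, hp, h1, h2, h3⟩)
          · exact Or.inl h
          · rcases List.mem_cons.mp hp with rfl | hp'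
            · exact absurd hn h2
            · exact Or.inr ⟨p, hp', h1, h2, h3⟩
      · have : (S.contains p0.1 && decide (p0.1 ≠ n)) = true := by simp [hS, hn]
        rw [this, if_pos rfl, ih]
        rw [pv_mem_addTargets]
        constructor
        · rintro ((h | ⟨e, he, hge, rfl⟩) | ⟨p, hp, h1, h2, h3⟩)
          · exact Or.inl h
          · exact Or.inr ⟨p0, List.mem_cons_self, hS, hn, e, he, hge, rfl⟩
          · exact Or.inr ⟨p, List.mem_cons_of_mem _ hp, h1, h2, h3⟩
        · rintro (h | ⟨p, hp, h1, h2, h3⟩)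
          · exact Or.inl (Or.inl h)
          · rcases List.mem_cons.mp hp with rfl | hp'
            · exact Or.inl (Or.inr h3)
            · exact Or.inr ⟨p, hp', h1, h2, h3⟩
    · have hc0 : S.contains p0.1 = false := by
        cases hb : S.contains p0.1
        · rfl
        · exact absurd (by simpa using hb) hS
      rw [show (S.contains p0.1 && decide (p0.1 ≠ n)) = false by rw [hc0, Bool.false_and], if_neg (by simp), ih]
      constructor
      · rintro (h | ⟨p, hp, h1, h2, h3⟩)
        · exact Or.inl h
        · exact Or.inr ⟨p, List.mem_cons_of_mem _ hp, h1, h2, h3⟩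
      · rintro (h | ⟨p, hp, h1, h2, h3⟩)
        · exact Or.inl h
        · rcases List.mem_cons.mp hp with rfl | hp'
          · exact absurd h1 hS
          · exact Or.inr ⟨p, hp', h1, h2, h3⟩

theorem pv_mem_expand (n : Int) (graph : List (Int × List (Int × Int))) (dis : List Int)
    (S : List Int) (c : Int) :
    c ∈ pvExpand n graph dis S ↔
      c ∈ S ∨ ∃ p ∈ graph, p.1 ∈ S ∧ p.1 ≠ n ∧
        ∃ e ∈ p.2, pvEdgeB graph dis p.1 e.1 = true ∧ e.1 = c :=
  pv_mem_expand_aux n graph dis S graph S c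

theorem pvReachB_succ_of (x n : Int) (graph : List (Int × List (Int × Int))) (dis : List Int)
    (k : Nat) (v : Int) (h : pvReachB x n graph dis k v = true) :
    pvReachB x n graph dis (k+1) v = true := by
  have hm : v ∈ pvReachList x n graph dis k := by simpa [pvReachB] using h
  have : v ∈ pvExpand n graph dis (pvReachList x n graph dis k) :=
    (pv_mem_expand n graph dis _ v).mpr (Or.inl hm)
  simpa [pvReachB, pvReachList] using this

theorem pvReachB_mono (x n : Int) (graph : List (Int × List (Int × Int))) (dis : List Int)
    {k k' : Nat} (hk : k ≤ k') (v : Int) (h : pvReachB x n graph dis k v = true) :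
    pvReachB x n graph dis k' v = true := by
  induction hk with
  | refl => exact h
  | step _ ih => exact pvReachB_succ_of _ _ _ _ _ _ ih

theorem pvReachB_self (x n : Int) (graph : List (Int × List (Int × Int))) (dis : List Int)
    (k : Nat) : pvReachB x n graph dis k x = true := by
  induction k with
  | zero => simp [pvReachB, pvReachList]
  | succ k ih => exact pvReachB_succ_of _ _ _ _ _ _ ih

theorem pvEdgeB_intro (graph : List (Int × List (Int × Int))) (dis : List Int) (u : Int)
    (e : Int × Int) (he : e ∈ (PySem.Dict.mk graph).getD u []) (dc du : Int)
    (h1 : PySem.List.pyGet? dis e.1 = some dc) (h2 : PySem.List.pyGet? dis u = some du)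
    (hlt : dc < du) : pvEdgeB graph dis u e.1 = true := by
  unfold pvEdgeB
  rw [List.any_eq_true]
  refine ⟨e, he, ?_⟩
  rw [h1, h2]
  simp [hlt]

theorem pvEdgeB_elim (graph : List (Int × List (Int × Int))) (dis : List Int) (u c : Int)
    (h : pvEdgeB graph dis u c = true) :
    ∃ e ∈ (PySem.Dict.mk graph).getD u [], e.1 = c ∧
      ∃ dc du, PySem.List.pyGet? dis e.1 = some dc ∧ PySem.List.pyGet? dis u = some du ∧ dc < du := by
  unfold pvEdgeB at h
  rw [List.any_eq_true] at h
  obtain ⟨e, he, hb⟩ := h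
  rw [Bool.and_eq_true] at hb
  refine ⟨e, he, by simpa using hb.1, ?_⟩
  rcases hc : PySem.List.pyGet? dis e.1 with _ | dc <;> rcases hu : PySem.List.pyGet? dis u with _ | du <;>
    rw [hc, hu] at hb <;> simp_all

theorem pvReachB_step (x n : Int) (graph : List (Int × List (Int × Int))) (dis : List Int)
    (k : Nat) (u : Int) (hu : pvReachB x n graph dis k u = true) (hun : u ≠ n)
    (e : Int × Int) (he : e ∈ (PySem.Dict.mk graph).getD u []) (dc du : Int)
    (h1 : PySem.List.pyGet? dis e.1 = some dc) (h2 : PySem.List.pyGet? dis u = some du)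
    (hlt : dc < du) : pvReachB x n graph dis (k+1) e.1 = true := by
  have hne : (PySem.Dict.mk graph).getD u [] ≠ [] := by
    intro hnil; rw [hnil] at he; simp at he
  have hmem := pv_entry_of_getD graph u hne
  have hedge := pvEdgeB_intro graph dis u e he dc du h1 h2 hlt
  have hus : u ∈ pvReachList x n graph dis k := by simpa [pvReachB] using hu
  have : e.1 ∈ pvExpand n graph dis (pvReachList x n graph dis k) :=
    (pv_mem_expand n graph dis _ e.1).mpr
      (Or.inr ⟨(u, (PySem.Dict.mk graph).getD u []), hmem, hus, hun, e, he, hedge, rfl⟩)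
  simpa [pvReachB, pvReachList] using this

theorem pvReachB_elim (x n : Int) (graph : List (Int × List (Int × Int))) (dis : List Int)
    (k : Nat) (v : Int) (h : pvReachB x n graph dis (k+1) v = true) :
    pvReachB x n graph dis k v = true ∨
    ∃ p ∈ graph, pvReachB x n graph dis k p.1 = true ∧ p.1 ≠ n ∧ pvEdgeB graph dis p.1 v = true := by
  have hm : v ∈ pvExpand n graph dis (pvReachList x n graph dis k) := by
    simpa [pvReachB, pvReachList] using h
  rcases (pv_mem_expand n graph dis _ v).mp hm with hm' | ⟨p, hp, h1, h2, e, _he, hge, rfl⟩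
  · exact Or.inl (by simpa [pvReachB] using hm')
  · exact Or.inr ⟨p, hp, by simpa [pvReachB] using h1, h2, hge⟩

-- any reachability derivation can be trimmed to fuel |dis|+1 (restricted edges strictly
-- decrease pvMu, so simple derivations suffice)
theorem pvReachB_trim_aux (x n : Int) (graph : List (Int × List (Int × Int))) (dis : List Int) :
    ∀ (k : Nat) (v : Int), pvReachB x n graph dis k v = true →
      pvReachB x n graph dis (dis.length + 1 - pvMu dis v) v = true := by
  intro k
  induction k with
  | zero =>
    intro v h
    have : v = x := by simpa [pvReachB, pvReachList] using h
    subst this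
    exact pvReachB_self _ _ _ _ _
  | succ k ih =>
    intro v h
    rcases pvReachB_elim x n graph dis k v h with h' | ⟨p, _hp, hr, hn, hedge⟩
    · exact ih v h'
    · obtain ⟨e, he, rfl, dc, du, h1, h2, hlt⟩ := pvEdgeB_elim graph dis p.1 v hedge
      have hmu : pvMu dis e.1 < pvMu dis p.1 := pvMu_lt dis p.1 e.1 du dc h2 h1 hlt
      have hle : pvMu dis p.1 ≤ dis.length := pvMu_le dis p.1
      have hstep := pvReachB_step x n graph dis _ p.1 (ih p.1 hr) hn e he dc du h1 h2 hlt
      exact pvReachB_mono x n graph dis (by omega) e.1 hstep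

theorem pvReachB_trim (x n : Int) (graph : List (Int × List (Int × Int))) (dis : List Int)
    (k : Nat) (v : Int) (h : pvReachB x n graph dis k v = true) :
    pvReachB x n graph dis (dis.length + 1) v = true :=
  pvReachB_mono x n graph dis (by omega) v (pvReachB_trim_aux x n graph dis k v h)

-- ----- facts about Source B's _collect -----

-- the child loop only appends
theorem pv_collectChildren_prefix (n : Int) (graph : List (Int × List (Int × Int))) (dis : List Int)
    (v : Int)
    (IH : ∀ (c : Int) (acc' : List Int), pvMu dis c < pvMu dis v →
      acc' <+: pvCollect c n graph dis acc') :
    ∀ (l : List (Int × Int)) (acc : List Int), acc <+: pvCollectChildren l v n graph dis acc := by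
  intro l
  induction l with
  | nil => intro acc; rw [pvCollectChildren]
  | cons hd tl ih =>
    intro acc
    obtain ⟨c, w⟩ := hd
    rw [pvCollectChildren]
    refine List.IsPrefix.trans ?_ (ih _)
    cases h1 : PySem.List.pyGet? dis c with
    | none => cases h2 : PySem.List.pyGet? dis v <;> exact List.prefix_refl _
    | some dc =>
      cases h2 : PySem.List.pyGet? dis v with
      | none => exact List.prefix_refl _
      | some dv =>
        by_cases h : dc < dv
        · simp only [h, dif_pos]
          exact IH c acc (pvMu_lt dis v c dv dc h2 h1 h)
        · simp only [h, dif_neg, not_false_iff]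
          exact List.prefix_refl _

-- _collect only appends
theorem pv_collect_prefix (n : Int) (graph : List (Int × List (Int × Int))) (dis : List Int) :
    ∀ (N : Nat) (v : Int) (acc : List Int), pvMu dis v ≤ N →
      acc <+: pvCollect v n graph dis acc := by
  intro N
  induction N using Nat.strong_induction_on with
  | _ N IHN =>
    intro v acc hle
    rw [pvCollect]
    by_cases hc : acc.contains v
    · rw [if_pos hc]
    · rw [if_neg hc]
      refine List.IsPrefix.trans ?_ ⟨[v], rfl⟩
      by_cases hvn : v = n
      · rw [if_pos hvn]
      · rw [if_neg hvn]
        exact pv_collectChildren_prefix n graph dis v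
          (fun c acc' hlt => IHN (pvMu dis c) (lt_of_lt_of_le hlt hle) c acc' (le_refl _)) _ acc

-- the child loop transports an invariant R closed under restricted edges
theorem pv_collectChildren_sound (n : Int) (graph : List (Int × List (Int × Int))) (dis : List Int)
    (R : Int → Prop) (v : Int) (hvn : v ≠ n) (hv : R v)
    (hstep : ∀ u, R u → u ≠ n → ∀ e ∈ (PySem.Dict.mk graph).getD u [],
      ∀ dc du, PySem.List.pyGet? dis e.1 = some dc → PySem.List.pyGet? dis u = some du →
      dc < du → R e.1)
    (IH : ∀ (c : Int) (acc' : List Int), pvMu dis c < pvMu dis v → R c → (∀ w ∈ acc', R w) →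
      ∀ w ∈ pvCollect c n graph dis acc', R w) :
    ∀ (l : List (Int × Int)), (∀ e ∈ l, e ∈ ((PySem.Dict.mk graph).getD v [] : List (Int × Int))) →
      ∀ (acc : List Int), (∀ w ∈ acc, R w) →
      ∀ w ∈ pvCollectChildren l v n graph dis acc, R w := by
  intro l
  induction l with
  | nil => intro _ acc hacc; rw [pvCollectChildren]; exact hacc
  | cons hd tl ih =>
    intro hsub acc hacc
    obtain ⟨c, w0⟩ := hd
    rw [pvCollectChildren]
    refine ih (fun e he => hsub e (List.mem_cons_of_mem _ he)) _ ?_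
    cases h1 : PySem.List.pyGet? dis c with
    | none => cases h2 : PySem.List.pyGet? dis v <;> exact hacc
    | some dc =>
      cases h2 : PySem.List.pyGet? dis v with
      | none => exact hacc
      | some dv =>
        by_cases h : dc < dv
        · simp only [h, dif_pos]
          have hRc : R c := hstep v hv hvn (c, w0) (hsub (c, w0) List.mem_cons_self) dc dv h1 h2 h
          exact IH c acc (pvMu_lt dis v c dv dc h2 h1 h) hRc hacc
        · simp only [h, dif_neg, not_false_iff]
          exact hacc

-- invariant transported by _collect: R holds of everything it adds
theorem pv_collect_sound (n : Int) (graph : List (Int × List (Int × Int))) (dis : List Int)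
    (R : Int → Prop)
    (hstep : ∀ u, R u → u ≠ n → ∀ e ∈ (PySem.Dict.mk graph).getD u [],
      ∀ dc du, PySem.List.pyGet? dis e.1 = some dc → PySem.List.pyGet? dis u = some du →
      dc < du → R e.1) :
    ∀ (N : Nat) (v : Int) (acc : List Int), pvMu dis v ≤ N → R v → (∀ u ∈ acc, R u) →
      ∀ u ∈ pvCollect v n graph dis acc, R u := by
  intro N
  induction N using Nat.strong_induction_on with
  | _ N IHN =>
    intro v acc hle hv hacc
    rw [pvCollect]
    by_cases hc : acc.contains v
    · rw [if_pos hc]; exact hacc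
    · rw [if_neg hc]
      intro u hu
      rw [List.mem_append] at hu
      rcases hu with hu | hu
      · by_cases hvn : v = n
        · rw [if_pos hvn] at hu; exact hacc u hu
        · rw [if_neg hvn] at hu
          exact pv_collectChildren_sound n graph dis R v hvn hv hstep
            (fun c acc' hlt => IHN (pvMu dis c) (lt_of_lt_of_le hlt hle) c acc' (le_refl _))
            _ (fun e he => he) acc hacc u hu
      · rw [List.mem_singleton] at hu; exact hu ▸ hv

-- the order produced by _collect lists each node's strict children before the node
def pvTopo (n : Int) (graph : List (Int × List (Int × Int))) (dis : List Int) (l : List Int) : Prop :=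
  ∀ pre u post, l = pre ++ u :: post → u ≠ n →
    ∀ e ∈ (PySem.Dict.mk graph).getD u [], ∀ dc du,
      PySem.List.pyGet? dis e.1 = some dc → PySem.List.pyGet? dis u = some du → dc < du →
      e.1 ∈ pre

theorem pv_snoc_decomp {α : Type} (pre post acc : List α) (u v : α)
    (h : pre ++ u :: post = acc ++ [v]) :
    (pre = acc ∧ u = v ∧ post = []) ∨ ∃ post', post = post' ++ [v] ∧ acc = pre ++ u :: post' := by
  rcases post.eq_nil_or_concat with rfl | ⟨post', w, rfl⟩
  · left
    have h' : pre ++ [u] = acc ++ [v] := by simpa using h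
    have h2 := List.append_inj' h' rfl
    simp only [List.cons.injEq, and_true] at h2
    exact ⟨h2.1, h2.2, rfl⟩
  · right
    rw [List.concat_eq_append, ← List.cons_append, ← List.append_assoc] at h
    have h2 := List.append_inj' h rfl
    simp only [List.cons.injEq, and_true] at h2
    exact ⟨post', by rw [List.concat_eq_append, h2.2], h2.1.symm⟩

-- the child loop: topo is preserved and every strict child of v lands in the result
theorem pv_collectChildren_topo (n : Int) (graph : List (Int × List (Int × Int))) (dis : List Int)
    (v : Int)
    (IHt : ∀ (c : Int) (acc' : List Int), pvMu dis c < pvMu dis v → pvTopo n graph dis acc' →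
      pvTopo n graph dis (pvCollect c n graph dis acc') ∧ c ∈ pvCollect c n graph dis acc')
    (IHp : ∀ (c : Int) (acc' : List Int), pvMu dis c < pvMu dis v →
      acc' <+: pvCollect c n graph dis acc') :
    ∀ (l : List (Int × Int)) (acc : List Int), pvTopo n graph dis acc →
      pvTopo n graph dis (pvCollectChildren l v n graph dis acc) ∧
      (∀ e ∈ l, ∀ dc du, PySem.List.pyGet? dis e.1 = some dc →
        PySem.List.pyGet? dis v = some du → dc < du →
        e.1 ∈ pvCollectChildren l v n graph dis acc) := by
  intro l
  induction l with
  | nil =>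
    intro acc hacc
    rw [pvCollectChildren]
    exact ⟨hacc, by simp⟩
  | cons hd tl ih =>
    intro acc hacc
    obtain ⟨c, w0⟩ := hd
    rw [pvCollectChildren]
    cases h1 : PySem.List.pyGet? dis c with
    | none =>
      cases h2 : PySem.List.pyGet? dis v with
      | none =>
        have hres := ih acc hacc
        refine ⟨hres.1, ?_⟩
        intro e he dc du he1 he2 hlt
        exact absurd he2 (by simp)
      | some dv =>
        have hres := ih acc hacc
        refine ⟨hres.1, ?_⟩
        intro e he dc du he1 he2 hlt
        rcases List.mem_cons.mp he with rfl | he'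
        · rw [h1] at he1; exact absurd he1 (by simp)
        · exact hres.2 e he' dc du he1 (h2.trans he2) hlt
    | some dc0 =>
      cases h2 : PySem.List.pyGet? dis v with
      | none =>
        have hres := ih acc hacc
        refine ⟨hres.1, ?_⟩
        intro e he dc du he1 he2 hlt
        exact absurd he2 (by simp)
      | some dv0 =>
        by_cases h : dc0 < dv0
        · simp only [h, dif_pos]
          have hcall := IHt c acc (pvMu_lt dis v c dv0 dc0 h2 h1 h) hacc
          have hrest := ih (pvCollect c n graph dis acc) hcall.1
          have hpref := pv_collectChildren_prefix n graph dis v IHp tl (pvCollect c n graph dis acc)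
          refine ⟨hrest.1, ?_⟩
          intro e he dc du he1 he2 hlt
          rcases List.mem_cons.mp he with rfl | he'
          · exact hpref.subset hcall.2
          · exact hrest.2 e he' dc du he1 (h2.trans he2) hlt
        · simp only [h, dif_neg, not_false_iff]
          have hres := ih acc hacc
          refine ⟨hres.1, ?_⟩
          intro e he dc du he1 he2 hlt
          rcases List.mem_cons.mp he with rfl | he'
          · rw [h1] at he1
            have hdc : dc0 = dc := Option.some.inj he1
            have hdu : dv0 = du := Option.some.inj he2
            exact absurd (hdc ▸ hdu ▸ hlt) h
          · exact hres.2 e he' dc du he1 (h2.trans he2) hlt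

theorem pv_collect_topo (n : Int) (graph : List (Int × List (Int × Int))) (dis : List Int) :
    ∀ (N : Nat) (v : Int) (acc : List Int), pvMu dis v ≤ N →
      pvTopo n graph dis acc →
      pvTopo n graph dis (pvCollect v n graph dis acc) ∧ v ∈ pvCollect v n graph dis acc := by
  intro N
  induction N using Nat.strong_induction_on with
  | _ N IHN =>
    intro v acc hle hacc
    rw [pvCollect]
    by_cases hc : acc.contains v
    · rw [if_pos hc]
      exact ⟨hacc, by simpa using hc⟩
    · rw [if_neg hc]
      by_cases hvn : v = n
      · rw [if_pos hvn]
        constructor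
        · intro pre u post hdec hun e he dc du h1 h2 hlt
          rcases pv_snoc_decomp pre post acc u v hdec.symm with ⟨rfl, rfl, rfl⟩ | ⟨post', rfl, rfl⟩
          · exact absurd hvn hun
          · exact hacc pre u post' rfl hun e he dc du h1 h2 hlt
        · simp
      · rw [if_neg hvn]
        have hres := pv_collectChildren_topo n graph dis v
          (fun c acc' hlt => IHN (pvMu dis c) (lt_of_lt_of_le hlt hle) c acc' (le_refl _))
          (fun c acc' hlt => pv_collect_prefix n graph dis (pvMu dis c) c acc' (le_refl _))
          ((PySem.Dict.mk graph).getD v []) acc hacc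
        constructor
        · intro pre u post hdec hun e he dc du h1 h2 hlt
          rcases pv_snoc_decomp pre post _ u v hdec.symm with ⟨rfl, rfl, rfl⟩ | ⟨post', rfl, hpre⟩
          · exact hres.2 e he dc du h1 h2 hlt
          · exact hres.1 pre u post' hpre hun e he dc du h1 h2 hlt
        · simp

-- ----- the table-filling pass computes A's values along a topological order -----

theorem pv_childFold (n : Int) (graph : List (Int × List (Int × Int))) (dis : List Int)
    (v : Int) (hv : PySem.Raise.InRange dis.length v) (cnt : PySem.Dict Int Int) :
    ∀ (l : List (Int × Int)),
      (∀ e ∈ l, PySem.Raise.InRange dis.length e.1 ∧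
        (pvKey dis e.1 < pvKey dis v → cnt.getD e.1 0 = dfs e.1 n graph dis)) →
      ∀ s : Int,
        l.foldl (fun total e => if pvKey dis e.1 < pvKey dis v then total + cnt.getD e.1 0 else total) s
          = s + dfsChildren l v n graph dis := by
  intro l
  induction l with
  | nil => intro _ s; rw [dfsChildren]; simp
  | cons hd tl ih =>
    intro hl s
    obtain ⟨c, w⟩ := hd
    have hc := hl (c, w) List.mem_cons_self
    have hrest : ∀ e ∈ tl, PySem.Raise.InRange dis.length e.1 ∧
        (pvKey dis e.1 < pvKey dis v → cnt.getD e.1 0 = dfs e.1 n graph dis) :=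
      fun e he => hl e (List.mem_cons_of_mem _ he)
    rw [dfsChildren, pv_pyGet?_of_inRange dis v hv, pv_pyGet?_of_inRange dis c hc.1]
    by_cases h : pvKey dis c < pvKey dis v
    · simp only [List.foldl_cons, if_pos h, dif_pos h]
      rw [ih hrest (s + cnt.getD c 0), hc.2 h]
      ring
    · simp only [List.foldl_cons, if_neg h, dif_neg h]
      rw [ih hrest s]
      ring

-- invariant of the table pass: the table holds A's value at exactly the processed nodes
def pvInv (n : Int) (graph : List (Int × List (Int × Int))) (dis : List Int)
    (cnt : PySem.Dict Int Int) (done : List Int) : Prop :=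
  ∀ k, cnt.get? k = if k ∈ done then some (dfs k n graph dis) else none

theorem pv_foldInv (n : Int) (graph : List (Int × List (Int × Int))) (dis : List Int)
    (L : List Int)
    (HTopo : pvTopo n graph dis L)
    (HSafe : ∀ v ∈ L, v ≠ n → (PySem.Dict.mk graph).getD v [] ≠ [] →
      PySem.Raise.InRange dis.length v ∧
      ∀ e ∈ (PySem.Dict.mk graph).getD v [], PySem.Raise.InRange dis.length e.1) :
    ∀ (todo done : List Int) (cnt : PySem.Dict Int Int),
      L = done ++ todo → pvInv n graph dis cnt done →
      pvInv n graph dis (todo.foldl (pvStep n graph dis) cnt) L := by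
  intro todo
  induction todo with
  | nil => intro done cnt hL hinv; simpa [hL] using hinv
  | cons v rest ih =>
    intro done cnt hL hinv
    have hvL : v ∈ L := by rw [hL]; simp
    have hstep : pvInv n graph dis (pvStep n graph dis cnt v) (done ++ [v]) := by
      intro k
      unfold pvStep
      by_cases hvn : v = n
      · rw [if_pos hvn, PySem.Dict.get?_insert]
        by_cases hk : k = v
        · subst hk
          rw [if_pos rfl]
          have : dfs k n graph dis = 1 := by rw [dfs, if_pos hvn]
          simp [this]
        · rw [if_neg hk, hinv k]
          by_cases hd : k ∈ done <;> simp [hd, hk]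
      · rw [if_neg hvn, PySem.Dict.get?_insert]
        by_cases hk : k = v
        · subst hk
          rw [if_pos rfl]
          have hval : ((PySem.Dict.mk graph).getD k []).foldl
              (fun total e => if pvKey dis e.1 < pvKey dis k then total + cnt.getD e.1 0 else total) 0
              = dfs k n graph dis := by
            by_cases hch : ((PySem.Dict.mk graph).getD k [] : List (Int × Int)) = []
            · rw [hch, dfs, if_neg hvn, hch, dfsChildren]
              simp
            · obtain ⟨hkR, hcR⟩ := HSafe k hvL hvn hch
              have hl : ∀ e ∈ (PySem.Dict.mk graph).getD k [],
                  PySem.Raise.InRange dis.length e.1 ∧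
                  (pvKey dis e.1 < pvKey dis k → cnt.getD e.1 0 = dfs e.1 n graph dis) := by
                intro e he
                refine ⟨hcR e he, fun hlt => ?_⟩
                have h1 := pv_pyGet?_of_inRange dis e.1 (hcR e he)
                have h2 := pv_pyGet?_of_inRange dis k hkR
                have hedone : e.1 ∈ done :=
                  HTopo done k rest hL hvn e he (pvKey dis e.1) (pvKey dis k) h1 h2 hlt
                rw [PySem.Dict.getD_eq_get?_getD, hinv e.1, if_pos hedone]
                rfl
              rw [pv_childFold n graph dis k hkR cnt _ hl 0, dfs, if_neg hvn]
              simp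
          simp [hval]
        · rw [if_neg hk, hinv k]
          by_cases hd : k ∈ done <;> simp [hd, hk]
    have hL' : L = (done ++ [v]) ++ rest := by rw [hL]; simp
    exact ih (done ++ [v]) (pvStep n graph dis cnt v) hL' hstep

theorem dfs_eq_alt (x n : Int) (graph : List (Int × List (Int × Int))) (dis : List Int)
    (hpre : Pre_dfs x n graph dis) : dfs x n graph dis = dfs_alt x n graph dis := by
  by_cases hxn : x = n
  · rw [dfs, dfs_alt, if_pos hxn, if_pos hxn]
  · rcases hpre with h | H
    · exact absurd h hxn
    set L := pvCollect x n graph dis [] with hLdef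
    -- everything _collect lists is reachable and mentioned
    have hsound : ∀ u ∈ L,
        pvReachB x n graph dis (dis.length + 1) u = true ∧ u ∈ pvNodes graph x := by
      refine pv_collect_sound n graph dis
        (fun u => pvReachB x n graph dis (dis.length + 1) u = true ∧ u ∈ pvNodes graph x)
        ?_ (pvMu dis x) x [] (le_refl _)
        ⟨pvReachB_self x n graph dis _, pv_x_mem_nodes graph x⟩ (by simp)
      intro u hu hun e he dc du h1 h2 hlt
      refine ⟨?_, pv_child_mem_nodes graph x u e he⟩
      exact pvReachB_trim x n graph dis _ e.1
        (pvReachB_step x n graph dis _ u hu.1 hun e he dc du h1 h2 hlt)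
    have htopo := pv_collect_topo n graph dis (pvMu dis x) x [] (le_refl _) (by
      intro pre u post hdec
      exact absurd hdec (by simp))
    have HSafe : ∀ v ∈ L, v ≠ n → (PySem.Dict.mk graph).getD v [] ≠ [] →
        PySem.Raise.InRange dis.length v ∧
        ∀ e ∈ (PySem.Dict.mk graph).getD v [], PySem.Raise.InRange dis.length e.1 := by
      intro v hv hvn hch
      exact H v (hsound v hv).2 (hsound v hv).1 hvn hch
    have hinv0 : pvInv n graph dis PySem.Dict.empty [] := by
      intro k; simp [PySem.Dict.get?_empty]
    have hfin := pv_foldInv n graph dis L htopo.1 HSafe L [] PySem.Dict.empty rfl hinv0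
    rw [dfs_alt, if_neg hxn, ← hLdef, PySem.Dict.getD_eq_get?_getD, hfin x, if_pos htopo.2]
    rfl

-- ===== VERDICT (by name: the statement is the Claim_ definition above) =====
theorem dfs_spec : Claim_equal_dfs := by
  intro x n graph dis _ hpre
  unfold Spec_dfs
  exact dfs_eq_alt x n graph dis hpre
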